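-- pv_equiv track=rewrite | github.com/NotHotTryHard/YaAlgs6.0 | HW3/E.py | is_valid_expr
-- ===== SOURCE A (Python) =====
-- def is_valid_expr(s):
--         allowed_chars = set("0123456789+-*/() ")
--         if not all(char in allowed_chars for char in s):
--             return False
--         tokens = s.split()
--         for i in range(len(tokens) - 1):
--             if tokens[i].isdigit() and tokens[i + 1].isdigit():
--                 return False
--         return True
-- ===== SOURCE B (Python) =====
-- def is_valid_expr(s):
--     allowed = set("0123456789+-*/() ")
--     prev_was_digit = False
--     cur_len = 0
--     cur_all_digit = True
--     for ch in s:
--         if ch not in allowed: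
--             return False
--         if ch == ' ':
--             if cur_len > 0:
--                 if cur_all_digit and prev_was_digit:
--                     return False
--                 prev_was_digit = cur_all_digit
--                 cur_len = 0
--                 cur_all_digit = True
--         else:
--             cur_len += 1
--             if not ('0' <= ch <= '9'):
--                 cur_all_digit = False
--     if cur_len > 0 and cur_all_digit and prev_was_digit:
--         return False
--     return True
-- ===== Notes on version B (the rewrite author's own statement) =====
-- stated objective: alternative
-- what changed: B replaces A's split()-into-a-token-list followed by an indexed scan over adjacent token pairs with a single left-to-right character pass that validates each character and tracks an in-progress token's length/all-digit flag plus whether the previous token was all digits.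
import Mathlib
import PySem

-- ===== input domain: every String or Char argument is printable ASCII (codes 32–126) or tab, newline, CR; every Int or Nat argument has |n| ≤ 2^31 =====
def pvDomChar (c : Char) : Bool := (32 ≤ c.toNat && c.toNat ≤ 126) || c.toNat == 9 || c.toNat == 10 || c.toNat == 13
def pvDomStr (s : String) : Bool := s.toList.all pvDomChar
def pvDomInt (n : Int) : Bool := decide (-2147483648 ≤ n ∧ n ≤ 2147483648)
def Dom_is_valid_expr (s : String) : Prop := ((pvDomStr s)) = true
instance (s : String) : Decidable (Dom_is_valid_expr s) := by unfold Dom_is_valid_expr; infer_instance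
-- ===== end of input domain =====

-- B replaces A's split()-then-adjacent-index scan by a single left-to-right pass over the
-- characters with a small state machine (different decomposition; no speed claim).

-- ===== PORT A =====
-- allowed_chars = set("0123456789+-*/() ")
def pvAllowedChars : PySem.Set Char := PySem.Set.ofList "0123456789+-*/() ".toList

-- the 'for i in range(len(tokens) - 1)' loop with its early return False
def pvCheckAdj (tokens : List String) : List Int → Bool
  | [] => true
  | i :: rest =>
      if PySem.Str.strIsdigit ((PySem.List.pyGet? tokens i).getD "") &&
         PySem.Str.strIsdigit ((PySem.List.pyGet? tokens (i + 1)).getD "") then false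
      else pvCheckAdj tokens rest

def is_valid_expr (s : String) : Bool :=
  if ¬ (s.toList.all (fun c => pvAllowedChars.contains c)) then false
  else
    let tokens := PySem.Str.split₀ s
    pvCheckAdj tokens (PySem.List.pyRange 0 ((tokens.length : Int) - 1) 1)

-- ===== PORT B =====
-- single pass: prevDigit = last finalized token was non-empty and all digits;
-- curLen / curAll are the in-progress token's length and all-digit flag
def pvScan : List Char → Bool → Nat → Bool → Bool
  | [], prevDigit, curLen, curAll =>
      if curLen > 0 && curAll && prevDigit then false else true
  | c :: rest, prevDigit, curLen, curAll =>
      if ¬ pvAllowedChars.contains c then false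
      else if c = ' ' then
        if curLen > 0 then
          if curAll && prevDigit then false
          else pvScan rest curAll 0 true
        else pvScan rest prevDigit curLen curAll
      else pvScan rest prevDigit (curLen + 1)
             (if ¬ ('0' ≤ c ∧ c ≤ '9') then false else curAll)

def is_valid_expr_alt (s : String) : Bool := pvScan s.toList false 0 true

-- ===== PRECONDITION & SPEC =====
def Spec_is_valid_expr (s : String) (out : Bool) : Prop := out = is_valid_expr_alt s
instance (s : String) (out : Bool) : Decidable (Spec_is_valid_expr s out) := by unfold Spec_is_valid_expr; infer_instance

-- ===== CLAIM (what is proved, stated in full; the proofs are below) =====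
def Claim_equal_is_valid_expr : Prop := ∀ (s : String), Dom_is_valid_expr s → Spec_is_valid_expr s (is_valid_expr s)

-- ===== LEMMAS AND PROOFS =====

-- reference predicate: no two adjacent all-digit tokens
def pvOk : Bool → List (List Char) → Bool
  | _, [] => true
  | prev, t :: rest => !(prev && PySem.Chars.strIsdigit t) && pvOk (PySem.Chars.strIsdigit t) rest

def pvOkS : Bool → List String → Bool
  | _, [] => true
  | prev, t :: rest => !(prev && PySem.Str.strIsdigit t) && pvOkS (PySem.Str.strIsdigit t) rest

theorem pvOkS_eq (prev : Bool) (toks : List String) :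
    pvOkS prev toks = pvOk prev (toks.map String.toList) := by
  induction toks generalizing prev with
  | nil => rfl
  | cons t rest ih => simp [pvOkS, pvOk, PySem.Str.strIsdigit_eq, ih]

theorem pvOkS_cons (p : Bool) (b : String) (rest : List String) :
    pvOkS p (b :: rest) = (!(p && PySem.Str.strIsdigit b) && pvOkS false (b :: rest)) := by
  simp [pvOkS]

theorem pvGo_acc (cs : List Char) (cur : List Char) (acc : List (List Char)) :
    PySem.Chars.split₀.go cs cur acc = acc.reverse ++ PySem.Chars.split₀.go cs cur [] := by
  induction cs generalizing cur acc with
  | nil => simp [PySem.Chars.split₀.go]; split <;> simp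
  | cons c rest ih =>
    simp only [PySem.Chars.split₀.go]
    split
    · split
      · exact ih _ _
      · rw [ih _ (cur.reverse :: acc), ih _ [cur.reverse]]; simp
    · exact ih _ _

theorem pvAllowed_space (c : Char) (h : pvAllowedChars.contains c = true) :
    PySem.Chars.isspace c = (c == ' ') := by
  simp [pvAllowedChars, PySem.Set.contains] at h
  rcases h with rfl|rfl|rfl|rfl|rfl|rfl|rfl|rfl|rfl|rfl|rfl|rfl|rfl|rfl|rfl|rfl|rfl <;> decide

theorem pvScan_invalid (cs : List Char) (prev : Bool) (len : Nat) (all : Bool)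
    (h : cs.all (fun c => pvAllowedChars.contains c) = false) :
    pvScan cs prev len all = false := by
  induction cs generalizing prev len all with
  | nil => simp at h
  | cons c rest ih =>
    simp only [List.all_cons, Bool.and_eq_false_iff] at h
    by_cases hc : pvAllowedChars.contains c = true
    · have hr : rest.all (fun c => pvAllowedChars.contains c) = false := by
        rcases h with h | h
        · rw [hc] at h; cases h
        · exact h
      simp only [pvScan]
      rw [if_neg (by simpa using hc)]
      split
      · split
        · split
          · rfl
          · exact ih _ _ _ hr
        · exact ih _ _ _ hr
      · exact ih _ _ _ hr
    · simp only [pvScan]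
      rw [if_pos hc]

theorem pvScan_eq_ok (cs : List Char) (cur : List Char) (prev : Bool)
    (h : cs.all (fun c => pvAllowedChars.contains c) = true) :
    pvScan cs prev cur.length (cur.all PySem.Chars.isdigit)
      = pvOk prev (PySem.Chars.split₀.go cs cur []) := by
  induction cs generalizing cur prev with
  | nil =>
    simp only [pvScan, PySem.Chars.split₀.go]
    cases cur with
    | nil => simp [pvOk]
    | cons d ds =>
      have hrev : PySem.Chars.strIsdigit (ds.reverse ++ [d])
          = (PySem.Chars.isdigit d && ds.all PySem.Chars.isdigit) := by
        simp [PySem.Chars.strIsdigit, Bool.and_comm]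
      cases prev <;> cases hd : PySem.Chars.isdigit d <;> cases hh : ds.all PySem.Chars.isdigit <;>
        simp [pvOk, hrev, hd, hh]
  | cons c rest ih =>
    simp only [List.all_cons, Bool.and_eq_true] at h
    obtain ⟨hc, hr⟩ := h
    have hsp := pvAllowed_space c hc
    by_cases hcs : c = ' '
    · subst hcs
      simp only [pvScan]
      rw [if_neg (by simpa using hc), if_pos trivial]
      simp only [PySem.Chars.split₀.go, hsp]
      cases cur with
      | nil =>
        simpa using ih [] prev hr
      | cons d ds =>
        have hrev : PySem.Chars.strIsdigit (ds.reverse ++ [d])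
            = (PySem.Chars.isdigit d && ds.all PySem.Chars.isdigit) := by
          simp [PySem.Chars.strIsdigit, Bool.and_comm]
        have hih₁ := ih [] true hr
        have hih₂ := ih [] false hr
        simp only [List.length_nil, List.all_nil] at hih₁ hih₂
        rw [pvGo_acc rest [] [(d :: ds).reverse]]
        cases prev <;> cases hd : PySem.Chars.isdigit d <;> cases hh : ds.all PySem.Chars.isdigit <;>
          simp [pvOk, hrev, hd, hh, hih₁, hih₂]
    · have hsp' : PySem.Chars.isspace c = false := by rw [hsp]; simp [hcs]
      simp only [pvScan]
      rw [if_neg (by simpa using hc), if_neg hcs]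
      simp only [PySem.Chars.split₀.go, hsp', Bool.false_eq_true]
      have hthis := ih (c :: cur) prev hr
      simp only [List.length_cons, List.all_cons] at hthis
      have harg : (if ¬('0' ≤ c ∧ c ≤ '9') then false else cur.all PySem.Chars.isdigit)
          = (PySem.Chars.isdigit c && cur.all PySem.Chars.isdigit) := by
        by_cases h1 : '0' ≤ c <;> by_cases h2 : c ≤ '9' <;>
          simp [PySem.Chars.isdigit, h1, h2]
      rw [harg, if_neg not_false, hthis]

theorem pvCheckAdj_shift (a : String) (tl : List String) (l : List Nat) :
    pvCheckAdj (a :: tl) (l.map (fun k => (0:Int) + (↑(Nat.succ k))))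
      = pvCheckAdj tl (l.map (fun k => (0:Int) + ↑k)) := by
  induction l with
  | nil => rfl
  | cons k rest ih =>
    rw [List.map_cons, List.map_cons, pvCheckAdj, pvCheckAdj]
    have e1 : ((0:Int) + (↑(Nat.succ k))) = ((k + 1 : Nat) : Int) := by omega
    have e2 : (((k + 1 : Nat) : Int) + 1) = ((k + 2 : Nat) : Int) := by omega
    have e3 : ((0:Int) + (k:Nat)) = ((k : Nat) : Int) := by omega
    have e4 : (((k:Nat):Int) + 1) = ((k + 1 : Nat) : Int) := by omega
    rw [e1, e2, e3, e4, PySem.List.pyGet?_natCast, PySem.List.pyGet?_natCast,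
        PySem.List.pyGet?_natCast, PySem.List.pyGet?_natCast]
    simp only [List.getElem?_cons_succ]
    rw [ih]
    rfl

theorem pvCheckAdj_eq_okS (toks : List String) :
    pvCheckAdj toks (PySem.List.pyRange 0 ((toks.length : Int) - 1) 1) = pvOkS false toks := by
  induction toks with
  | nil => rfl
  | cons a tl ih =>
    cases tl with
    | nil => rfl
    | cons b rest =>
      have hlen : (((a :: b :: rest).length : Int) - 1) = ((rest.length + 1 : Nat) : Int) := by
        simp
      rw [hlen, PySem.List.pyRange_one]
      rw [show (((rest.length + 1 : Nat) : Int) - 0).toNat = rest.length + 1 by simp]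
      rw [List.range_succ_eq_map, List.map_cons, List.map_map]
      rw [pvCheckAdj]
      have g0 : PySem.List.pyGet? (a :: b :: rest) ((0:Int) + ((0:Nat):Int)) = some a := by
        rw [show ((0:Int) + ((0:Nat):Int)) = ((0:Nat):Int) by simp, PySem.List.pyGet?_natCast]; rfl
      have g1 : PySem.List.pyGet? (a :: b :: rest) ((0:Int) + ((0:Nat):Int) + 1) = some b := by
        rw [show ((0:Int) + ((0:Nat):Int) + 1) = ((1:Nat):Int) by simp, PySem.List.pyGet?_natCast]; rfl
      rw [show ((fun k => (0:Int) + ↑k) ∘ Nat.succ) = (fun k => (0:Int) + (↑(Nat.succ k))) from rfl]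
      rw [g0, g1, pvCheckAdj_shift a (b :: rest) (List.range rest.length)]
      have hback : ((List.range rest.length).map (fun k => (0:Int) + ↑k))
          = PySem.List.pyRange 0 (((b :: rest).length : Int) - 1) 1 := by
        rw [PySem.List.pyRange_one]
        norm_num
      rw [hback, ih, pvOkS_cons]
      cases h1 : PySem.Chars.strIsdigit a.toList <;> cases h2 : PySem.Chars.strIsdigit b.toList <;>
        simp [pvOkS, PySem.Str.strIsdigit_eq, h1, h2]

-- ===== VERDICT (by name: the statement is the Claim_ definition above) =====
theorem is_valid_expr_spec : Claim_equal_is_valid_expr := by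
  intro s _
  unfold Spec_is_valid_expr is_valid_expr is_valid_expr_alt
  by_cases h : s.toList.all (fun c => pvAllowedChars.contains c) = true
  · simp only [h, not_true, if_false]
    have hB := pvScan_eq_ok s.toList [] false h
    simp only [List.length_nil, List.all_nil] at hB
    rw [pvCheckAdj_eq_okS, pvOkS_eq, PySem.Str.split₀_map_toList]
    rw [hB]
    rfl
  · have h' : s.toList.all (fun c => pvAllowedChars.contains c) = false := by
      simpa using h
    simp only [h']
    exact (pvScan_invalid s.toList false 0 true h').symm
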